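-- pv_equiv track=rewrite | github.com/fabiansato/Python-Ejercicios | 02-UNGS/clase 11/funcionesLista.py | EliminarDesde
-- ===== SOURCE A (Python) =====
-- def EliminarDesde(num, lista, pos):
--     i = pos
--     while i < len(lista):
--         if num == lista[i]:
--             lista.pop(i)
--         else:
--             i += 1
--     return lista
-- ===== SOURCE B (Python) =====
-- def EliminarDesde(num, lista, pos):
--     lista[pos:] = [x for x in lista[pos:] if not (num == x)]
--     return lista
-- ===== Notes on version B (the rewrite author's own statement) =====
-- stated objective: idiomatic
-- what changed: Replaces A's index-walking while loop that pops matching elements one by one with a single slice assignment of a filtered list comprehension over the tail.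
-- outside the precondition, e.g. on EliminarDesde(1, [1, 2, 1], -1): A returns [2], B returns [1, 2]; on EliminarDesde(5, [5, 5], -2): A raises IndexError, B returns []
import Mathlib
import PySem

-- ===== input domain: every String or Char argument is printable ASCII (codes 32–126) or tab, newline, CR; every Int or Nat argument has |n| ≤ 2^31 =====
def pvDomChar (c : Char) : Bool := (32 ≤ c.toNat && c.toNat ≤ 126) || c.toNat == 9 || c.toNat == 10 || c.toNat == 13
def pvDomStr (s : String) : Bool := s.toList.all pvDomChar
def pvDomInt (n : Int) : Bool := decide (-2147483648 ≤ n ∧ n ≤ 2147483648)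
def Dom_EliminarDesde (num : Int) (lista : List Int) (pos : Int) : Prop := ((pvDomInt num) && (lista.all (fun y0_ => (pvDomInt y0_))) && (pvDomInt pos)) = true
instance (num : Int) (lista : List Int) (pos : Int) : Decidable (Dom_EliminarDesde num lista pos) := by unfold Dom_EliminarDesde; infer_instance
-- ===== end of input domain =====

-- B replaces A's index-walking pop loop with one slice assignment of a filtered
-- comprehension (idiomatic); both mutate the list in place the same way, and the
-- theorems here are about the returned value.

-- ===== PORT A =====
-- the while loop of A: i walks from pos, popping lista[i] when it equals num
def EliminarDesdeGo (num : Int) (lista : List Int) (i : Int) : List Int :=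
  if _h : i < (lista.length : Int) then
    match PySem.List.pyGet? lista i with
    | none => lista                       -- Python raises IndexError here (outside Pre_)
    | some x =>
      if num == x then
        match hp : PySem.List.pop? lista i with
        | none => lista                   -- Python raises IndexError here (outside Pre_)
        | some r => EliminarDesdeGo num r.2 i
      else EliminarDesdeGo num lista (i + 1)
  else lista
termination_by (2 * (lista.length : Int) - i).toNat
decreasing_by
  · have := PySem.List.length_of_pop?_eq_some lista hp
    omega
  · omega

def EliminarDesde (num : Int) (lista : List Int) (pos : Int) : List Int :=
  EliminarDesdeGo num lista pos

-- ===== PORT B =====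
-- lista[pos:] = [x for x in lista[pos:] if not (num == x)]; return lista
def EliminarDesde_alt (num : Int) (lista : List Int) (pos : Int) : List Int :=
  PySem.List.slice lista none (some pos) ++
    (PySem.List.slice lista (some pos) none).filter (fun x => !(num == x))

-- ===== PRECONDITION & SPEC =====
-- Pre_ excludes negative pos: there A's negative-index wraparound walks back into
-- the front of the list (also removing occurrences before pos) or raises
-- IndexError, while B only filters the last |pos| elements — a defensible corner
-- nobody would specify either way.
def Pre_EliminarDesde (num : Int) (lista : List Int) (pos : Int) : Prop := 0 ≤ pos
instance (num : Int) (lista : List Int) (pos : Int) : Decidable (Pre_EliminarDesde num lista pos) := by unfold Pre_EliminarDesde; infer_instance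
def pvWitness_EliminarDesde : Int × List Int × Int := (5, ([1, 5, 2], 1))

def Spec_EliminarDesde (num : Int) (lista : List Int) (pos : Int) (out : List Int) : Prop := out = EliminarDesde_alt num lista pos
instance (num : Int) (lista : List Int) (pos : Int) (out : List Int) : Decidable (Spec_EliminarDesde num lista pos out) := by unfold Spec_EliminarDesde; infer_instance

-- ===== CLAIM (what is proved, stated in full; the proofs are below) =====
def Claim_equal_EliminarDesde : Prop := ∀ (num : Int) (lista : List Int) (pos : Int), Dom_EliminarDesde num lista pos → Pre_EliminarDesde num lista pos → Spec_EliminarDesde num lista pos (EliminarDesde num lista pos)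

-- ===== LEMMAS AND PROOFS =====

-- loop characterisation: for a natural index n, the loop keeps the prefix before n
-- and filters num out of the rest
lemma EliminarDesdeGo_eq (num : Int) :
    ∀ (k : Nat) (l : List Int) (n : Nat), l.length - n ≤ k →
      EliminarDesdeGo num l (n : Int) =
        l.take n ++ (l.drop n).filter (fun x => !(num == x)) := by
  intro k
  induction k with
  | zero =>
    intro l n hk
    have hlen : l.length ≤ n := by omega
    rw [EliminarDesdeGo]
    simp [List.take_of_length_le hlen, List.drop_of_length_le hlen,
      show ¬((n : Int) < (l.length : Int)) from by exact_mod_cast not_lt.mpr hlen]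
  | succ k ih =>
    intro l n hk
    by_cases hlt : n < l.length
    · rw [EliminarDesdeGo,
        dif_pos (show ((n : Int) < (l.length : Int)) from by exact_mod_cast hlt)]
      have hget : PySem.List.pyGet? l (n : Int) = some l[n] := by
        simp [PySem.List.pyGet?_natCast l n, List.getElem?_eq_getElem hlt]
      have hpop : PySem.List.pop? l (n : Int) = some (l[n], l.eraseIdx n) :=
        PySem.List.pop?_natCast l n hlt
      have hdrop : l.drop n = l[n] :: l.drop (n + 1) := List.drop_eq_getElem_cons hlt
      have htake : l.take (n + 1) = l.take n ++ [l[n]] := by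
        rw [List.take_add_one, List.getElem?_eq_getElem hlt]; rfl
      rw [hget]
      by_cases heq : num = l[n]
      · have hb : (num == l[n]) = true := by simp [heq]
        simp only [hb, if_pos]
        split
        · next hnone => rw [hpop] at hnone; cases hnone
        · next r hr =>
          rw [hpop] at hr
          injection hr with hr
          subst hr
          have ihr := ih (l.eraseIdx n) n (by
            have := List.length_eraseIdx_of_lt hlt; omega)
          rw [ihr, List.eraseIdx_eq_take_drop_succ]
          have htn : (l.take n).length = n := List.length_take_of_le (le_of_lt hlt)
          rw [List.take_append_of_le_length (by omega),
            List.drop_append_of_le_length (by omega)]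
          have h1 : (l.take n).take n = l.take n := by simp
          have h2 : (l.take n).drop n = ([] : List Int) := by
            apply List.drop_of_length_le; omega
          rw [h1, h2]
          simp only [List.nil_append]
          rw [hdrop, List.filter_cons]
          simp [hb]
      · have hb : (num == l[n]) = false := by simp [heq]
        simp only [hb, Bool.false_eq_true, if_false]
        have ihr := ih l (n + 1) (by omega)
        rw [show ((n : Int) + 1) = ((n + 1 : Nat) : Int) from by push_cast; ring, ihr,
          hdrop, List.filter_cons]
        rw [htake, List.append_assoc]
        simp [heq]
    · rw [EliminarDesdeGo]
      have hlen : l.length ≤ n := by omega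
      simp [List.take_of_length_le hlen, List.drop_of_length_le hlen,
        show ¬((n : Int) < (l.length : Int)) from by exact_mod_cast not_lt.mpr hlen]

-- ===== VERDICT (by name: the statement is the Claim_ definition above) =====
theorem EliminarDesde_spec : Claim_equal_EliminarDesde := by
  intro num lista pos _ hpre
  unfold Spec_EliminarDesde EliminarDesde EliminarDesde_alt
  obtain ⟨n, rfl⟩ : ∃ n : Nat, pos = (n : Int) := ⟨pos.toNat, (Int.toNat_of_nonneg hpre).symm⟩
  rw [EliminarDesdeGo_eq num lista.length lista n (by omega),
      PySem.List.slice_to_natCast, PySem.List.slice_from_natCast]
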